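-- pv_equiv track=rewrite | github.com/ydb-platform/ydb | contrib/python/trollsift/trollsift/parser.py | _regex_datetime
-- ===== SOURCE A (Python) =====
-- def _regex_datetime(format_spec: str) -> str:
--     replace_str = format_spec
--     for fmt_key, fmt_val in DT_FMT.items():
--         if fmt_key == "%%":
--             # special case
--             replace_str.replace("%%", "%")
--             continue
--         count = fmt_val.count("?")
--         # either a series of numbers or letters/numbers
--         regex = r"\d{{{:d}}}".format(count) if count else r"[^ \t\n\r\f\v\-_:]+"
--         replace_str = replace_str.replace(fmt_key, regex)
--     return replace_str
--
-- DT_FMT = {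
--     "%a": "*",
--     "%A": "*",
--     "%w": "?",
--     "%d": "??",
--     "%b": "*",
--     "%B": "*",
--     "%m": "??",
--     "%y": "??",
--     "%Y": "????",
--     "%H": "??",
--     "%I": "??",
--     "%p": "*",
--     "%M": "??",
--     "%S": "??",
--     "%f": "*",
--     "%z": "*",
--     "%Z": "*",
--     "%j": "???",
--     "%U": "??",
--     "%W": "??",
--     "%c": "*",
--     "%x": "*",
--     "%X": "*",
--     "%%": "?",
-- }
-- ===== SOURCE B (Python) =====
-- # One left-to-right scan with direct dispatch on the character after '%',
-- # instead of one full-string str.replace pass per format code.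
--
-- _PAT = {"w": 1, "d": 2, "m": 2, "y": 2, "Y": 4, "H": 2, "I": 2,
--         "M": 2, "S": 2, "j": 3, "U": 2, "W": 2}
-- _ANY = "aAbBpfzZcxX"
--
--
-- def _regex_datetime(format_spec: str) -> str:
--     out = []
--     i = 0
--     n = len(format_spec)
--     while i < n:
--         c = format_spec[i]
--         if c == "%" and i + 1 < n:
--             d = format_spec[i + 1]
--             if d in _PAT:
--                 out.append(r"\d{%d}" % _PAT[d])
--                 i += 2
--                 continue
--             if d in _ANY:
--                 out.append(r"[^ \t\n\r\f\v\-_:]+")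
--                 i += 2
--                 continue
--         out.append(c)
--         i += 1
--     return "".join(out)
-- ===== Notes on version B (the rewrite author's own statement) =====
-- stated objective: alternative
-- what changed: Replaces A's ~23 sequential full-string str.replace passes (one per datetime code) with one left-to-right scan that dispatches directly on the character following a percent sign via two small precomputed tables.
import Mathlib
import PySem

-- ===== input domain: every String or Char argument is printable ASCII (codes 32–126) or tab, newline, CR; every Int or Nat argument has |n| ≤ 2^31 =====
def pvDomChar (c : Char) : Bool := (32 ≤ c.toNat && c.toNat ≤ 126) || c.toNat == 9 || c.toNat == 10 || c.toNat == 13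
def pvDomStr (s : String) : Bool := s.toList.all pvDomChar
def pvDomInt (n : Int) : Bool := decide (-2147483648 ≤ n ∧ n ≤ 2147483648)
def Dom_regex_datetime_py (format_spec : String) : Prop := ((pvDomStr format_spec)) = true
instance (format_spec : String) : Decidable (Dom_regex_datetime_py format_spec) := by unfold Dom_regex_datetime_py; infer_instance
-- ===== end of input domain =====

-- B replaces A's ~23 sequential full-string replace passes by one left-to-right
-- scan that dispatches directly on the character following a percent sign (alternative decomposition, same result).


-- ===== PORT A =====
-- module constant DT_FMT (a Python dict, insertion order)
def dtFmt : PySem.Dict String String := PySem.Dict.ofList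
  [("%a", "*"), ("%A", "*"), ("%w", "?"), ("%d", "??"), ("%b", "*"), ("%B", "*"),
   ("%m", "??"), ("%y", "??"), ("%Y", "????"), ("%H", "??"), ("%I", "??"), ("%p", "*"),
   ("%M", "??"), ("%S", "??"), ("%f", "*"), ("%z", "*"), ("%Z", "*"), ("%j", "???"),
   ("%U", "??"), ("%W", "??"), ("%c", "*"), ("%x", "*"), ("%X", "*"), ("%%", "?")]

def regex_datetime_py (format_spec : String) : String :=
  -- for fmt_key, fmt_val in DT_FMT.items(): …
  dtFmt.items.foldl (fun replace_str kv =>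
    if kv.1 = "%%" then
      -- `replace_str.replace("%%", "%")` — result discarded in the Python, so no effect
      replace_str
    else
      let count := PySem.Str.count kv.2 "?"
      let regex := if count ≠ 0 then "\\d{" ++ PySem.Int.toStr (Int.ofNat count) ++ "}"
                   else "[^ \\t\\n\\r\\f\\v\\-_:]+"
      PySem.Str.replace replace_str kv.1 regex) format_spec

-- ===== PORT B =====
-- _PAT: digit-width table; _ANY: codes matched by the catch-all pattern
def pvPAT : List (Char × Nat) :=
  [('w', 1), ('d', 2), ('m', 2), ('y', 2), ('Y', 4), ('H', 2), ('I', 2),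
   ('M', 2), ('S', 2), ('j', 3), ('U', 2), ('W', 2)]
def pvANY : List Char := ['a', 'A', 'b', 'B', 'p', 'f', 'z', 'Z', 'c', 'x', 'X']

-- the body of Source B's two membership tests: the replacement for '%'‑d, if any
def bDispatch (d : Char) : Option String :=
  match pvPAT.find? (fun p => p.1 == d) with
  | some p => some ("\\d{" ++ PySem.Int.toStr (Int.ofNat p.2) ++ "}")
  | none => if d ∈ pvANY then some "[^ \\t\\n\\r\\f\\v\\-_:]+" else none

-- the while-loop of Source B: one pass over the characters
def scanGo (l : List Char) : List Char :=
  match l with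
  | [] => []
  | c :: t =>
    if c = '%' then
      match t with
      | d :: t' =>
        match bDispatch d with
        | some rep => rep.toList ++ scanGo t'
        | none => c :: scanGo (d :: t')
      | [] => [c]
    else c :: scanGo t
termination_by l.length

def regex_datetime_py_alt (format_spec : String) : String :=
  String.ofList (scanGo format_spec.toList)

-- ===== PRECONDITION & SPEC =====
def Spec_regex_datetime_py (format_spec : String) (out : String) : Prop := out = regex_datetime_py_alt format_spec
instance (format_spec : String) (out : String) : Decidable (Spec_regex_datetime_py format_spec out) := by unfold Spec_regex_datetime_py; infer_instance

-- ===== CLAIM (what is proved, stated in full; the proofs are below) =====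
def Claim_equal_regex_datetime_py : Prop := ∀ (format_spec : String), Dom_regex_datetime_py format_spec → Spec_regex_datetime_py format_spec (regex_datetime_py format_spec)

-- ===== LEMMAS AND PROOFS =====

-- rep2 x r l: Python's str.replace with the two-character pattern ['%', x]
def rep2 (x : Char) (r : List Char) : List Char → List Char
  | [] => []
  | [c] => [c]
  | c :: d :: t =>
    if c = '%' ∧ d = x then r ++ rep2 x r t
    else c :: rep2 x r (d :: t)
termination_by l => l.length

lemma rep2_cons_ne (x : Char) (r : List Char) (c : Char) (t : List Char) (hc : c ≠ '%') :
    rep2 x r (c :: t) = c :: rep2 x r t := by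
  cases t with
  | nil => simp [rep2]
  | cons d t' => simp [rep2, hc]

lemma go_eq_rep2 (x : Char) (r : List Char) :
    ∀ (fuel : Nat) (l acc : List Char), l.length ≤ fuel →
      PySem.Chars.replace.go ['%', x] r fuel l acc = acc.reverse ++ rep2 x r l := by
  intro fuel
  induction fuel with
  | zero =>
    intro l acc hl
    have : l = [] := List.eq_nil_of_length_eq_zero (Nat.le_zero.mp hl)
    subst this
    rw [PySem.Chars.replace.go]
    simp [rep2]
  | succ fuel ih =>
    intro l acc hl
    cases l with
    | nil =>
      rw [PySem.Chars.replace.go]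
      · simp [rep2]
      · omega
    | cons c t =>
      rw [PySem.Chars.replace.go]
      by_cases hpre : List.isPrefixOf ['%', x] (c :: t) = true
      · have hp : ['%', x] <+: c :: t := List.isPrefixOf_iff_prefix.mp hpre
        obtain ⟨u, hu⟩ := hp
        obtain ⟨hc, ht⟩ : '%' = c ∧ x :: u = t := by simpa using hu
        subst hc; subst ht
        simp only [hpre, if_true, List.length_cons, List.drop_succ_cons, List.length_nil, List.drop]
        rw [ih u (r.reverse ++ acc) (by simp at hl ⊢; omega)]
        simp [rep2]
      · simp only [hpre, if_false, Bool.false_eq_true]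
        rw [ih t (c :: acc) (by simp at hl ⊢; omega)]
        have : rep2 x r (c :: t) = c :: rep2 x r t := by
          cases t with
          | nil => simp [rep2]
          | cons d t' =>
            have : ¬(c = '%' ∧ d = x) := by
              intro ⟨h1, h2⟩
              exact hpre (by subst h1; subst h2; simp [List.isPrefixOf])
            simp [rep2, this]
        simp [this]

lemma replace_eq_rep2 (x : Char) (r l : List Char) :
    PySem.Chars.replace l ['%', x] r = rep2 x r l := by
  simp [PySem.Chars.replace]
  exact go_eq_rep2 x r l.length l [] le_rfl

-- the 23 effective (key-char, replacement) pairs, in DT_FMT order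
def pvStar : List Char := ['[','^',' ','\\','t','\\','n','\\','r','\\','f','\\','v','\\','-','_',':',']','+']
def pvD1 : List Char := ['\\','d','{','1','}']
def pvD2 : List Char := ['\\','d','{','2','}']
def pvD3 : List Char := ['\\','d','{','3','}']
def pvD4 : List Char := ['\\','d','{','4','}']
def kvs : List (Char × List Char) :=
  [('a', pvStar), ('A', pvStar), ('w', pvD1), ('d', pvD2), ('b', pvStar), ('B', pvStar),
   ('m', pvD2), ('y', pvD2), ('Y', pvD4), ('H', pvD2), ('I', pvD2), ('p', pvStar),
   ('M', pvD2), ('S', pvD2), ('f', pvStar), ('z', pvStar), ('Z', pvStar), ('j', pvD3),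
   ('U', pvD2), ('W', pvD2), ('c', pvStar), ('x', pvStar), ('X', pvStar)]

def foldAll (ks : List (Char × List Char)) (l : List Char) : List Char :=
  ks.foldl (fun s p => rep2 p.1 p.2 s) l

-- facts about the table, checked by computation
set_option maxRecDepth 8000 in
lemma tableFacts : ∀ p ∈ kvs, p.1 ≠ '%' ∧ p.2 ≠ [] ∧ '%' ∉ p.2 ∧
    (∀ c, p.2.head? = some c → ∀ q ∈ kvs, q.1 ≠ c) := by
  intro p hp
  fin_cases hp <;> refine ⟨by decide, by decide, by decide, ?_⟩ <;>
    (intro c hc; simp [pvStar,pvD1,pvD2,pvD3,pvD4] at hc; subst hc; decide)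

-- B's dispatch agrees with the kvs table
set_option maxRecDepth 4000 in
lemma bridge_mem : ∀ p ∈ kvs, bDispatch p.1 = some (String.ofList p.2) := by
  intro p hp
  fin_cases hp <;> rfl

set_option maxRecDepth 4000 in
lemma pat_keys_sub : ∀ q ∈ pvPAT, q.1 ∈ kvs.map Prod.fst := by
  intro q hq
  fin_cases hq <;> decide
set_option maxRecDepth 4000 in
lemma any_sub : ∀ c ∈ pvANY, c ∈ kvs.map Prod.fst := by
  intro c hc
  fin_cases hc <;> decide

lemma bridge_none (d : Char) (h : ∀ p ∈ kvs, p.1 ≠ d) : bDispatch d = none := by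
  have hd : d ∉ kvs.map Prod.fst := by
    intro hmem
    obtain ⟨p, hp, hpd⟩ := List.mem_map.mp hmem
    exact h p hp hpd
  have hfind : pvPAT.find? (fun p => p.1 == d) = none := by
    apply List.find?_eq_none.mpr
    intro q hq
    simp only [beq_iff_eq]
    intro hqd
    exact hd (hqd ▸ pat_keys_sub q hq)
  have hany : d ∉ pvANY := fun hmem => hd (any_sub d hmem)
  simp [bDispatch, hfind, hany]

lemma foldAll_cons_ne (c : Char) (hc : c ≠ '%') :
    ∀ (ks : List (Char × List Char)) (t : List Char),
      foldAll ks (c :: t) = c :: foldAll ks t := by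
  intro ks
  induction ks with
  | nil => intro t; rfl
  | cons p ks ih =>
    intro t
    simp only [foldAll, List.foldl_cons] at *
    rw [rep2_cons_ne _ _ _ _ hc, ih]

lemma foldAll_pct_nil : ∀ (ks : List (Char × List Char)), foldAll ks ['%'] = ['%'] := by
  intro ks
  induction ks with
  | nil => rfl
  | cons p ks ih =>
    simp only [foldAll, List.foldl_cons] at *
    simpa [rep2] using ih

def noKey (c : Char) : Prop := ∀ p ∈ kvs, p.1 ≠ c

def headSafe (w : List Char) : Prop := ∀ c, w.head? = some c → noKey c

lemma headSafe_rep2 (x : Char) (r : List Char) (hmem : (x, r) ∈ kvs) (w : List Char)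
    (hw : headSafe w) : headSafe (rep2 x r w) := by
  obtain ⟨-, hr_ne, -, hr_head⟩ := tableFacts (x, r) hmem
  cases w with
  | nil => intro e he; simp [rep2] at he
  | cons c t =>
    cases t with
    | nil =>
      intro e he
      simp only [rep2, List.head?_cons, Option.some.injEq] at he
      exact he ▸ hw c rfl
    | cons d t' =>
      by_cases h : c = '%' ∧ d = x
      · intro e he
        simp only [rep2, if_pos h] at he
        rw [List.head?_append] at he
        cases hr : r.head? with
        | none => exact absurd (List.head?_eq_none_iff.mp hr) hr_ne
        | some rh =>
          rw [hr] at he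
          simp only [Option.some_or, Option.some.injEq] at he
          intro q hq
          exact he ▸ hr_head rh hr q hq
      · intro e he
        simp only [rep2, if_neg h, List.head?_cons, Option.some.injEq] at he
        exact he ▸ hw c rfl

lemma foldAll_pct_safe :
    ∀ (ks : List (Char × List Char)), (∀ p ∈ ks, p ∈ kvs) →
      ∀ w, headSafe w → foldAll ks ('%' :: w) = '%' :: foldAll ks w := by
  intro ks
  induction ks with
  | nil => intro _ w _; rfl
  | cons p ks ih =>
    intro hks w hw
    obtain ⟨x, r⟩ := p
    have hmem : (x, r) ∈ kvs := hks _ (List.mem_cons_self)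
    have hstep : rep2 x r ('%' :: w) = '%' :: rep2 x r w := by
      cases w with
      | nil => simp [rep2]
      | cons d t =>
        have hdx : d ≠ x := by
          intro h
          exact hw d rfl (x, r) hmem h.symm
        simp [rep2, hdx]
    simp only [foldAll, List.foldl_cons] at *
    rw [hstep, ih (fun q hq => hks q (List.mem_cons_of_mem _ hq)) _ (headSafe_rep2 x r hmem w hw)]

lemma foldAll_pct_otherkey (d : Char) (hd : d ≠ '%') :
    ∀ (ks : List (Char × List Char)), (∀ p ∈ ks, p.1 ≠ d) →
      ∀ w, foldAll ks ('%' :: d :: w) = '%' :: d :: foldAll ks w := by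
  intro ks
  induction ks with
  | nil => intro _ w; rfl
  | cons p ks ih =>
    intro hks w
    have hdx : d ≠ p.1 := by
      intro h
      exact hks p List.mem_cons_self h.symm
    simp only [foldAll, List.foldl_cons] at *
    rw [show rep2 p.1 p.2 ('%' :: d :: w) = '%' :: d :: rep2 p.1 p.2 w by
          simp [rep2, hdx, rep2_cons_ne p.1 p.2 d w hd],
        ih (fun q hq => hks q (List.mem_cons_of_mem _ hq))]

lemma rep2_append_no_pct (x : Char) (r v w : List Char) (hv : '%' ∉ v) :
    rep2 x r (v ++ w) = v ++ rep2 x r w := by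
  induction v with
  | nil => rfl
  | cons c v' ih =>
    have hc : c ≠ '%' := by intro h; exact hv (h ▸ List.mem_cons_self)
    have hv' : '%' ∉ v' := fun h => hv (List.mem_cons_of_mem _ h)
    rw [List.cons_append, rep2_cons_ne _ _ _ _ hc, ih hv']; simp

lemma foldAll_append_no_pct (v : List Char) (hv : '%' ∉ v) :
    ∀ (ks : List (Char × List Char)) (w : List Char),
      foldAll ks (v ++ w) = v ++ foldAll ks w := by
  intro ks
  induction ks with
  | nil => intro w; rfl
  | cons p ks ih =>
    intro w
    simp only [foldAll, List.foldl_cons] at *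
    rw [rep2_append_no_pct _ _ _ _ hv, ih]

lemma foldAll_keyhit (d : Char) (r : List Char) (K1 K2 : List (Char × List Char))
    (hsplit : kvs = K1 ++ (d, r) :: K2) (hK1 : ∀ p ∈ K1, p.1 ≠ d) (t : List Char) :
    foldAll kvs ('%' :: d :: t) = r ++ foldAll kvs t := by
  have hmem : (d, r) ∈ kvs := by rw [hsplit]; exact List.mem_append_right _ List.mem_cons_self
  obtain ⟨hd, -, hr, -⟩ := tableFacts (d, r) hmem
  have hfold : ∀ (s : List Char), foldAll kvs s = foldAll K2 (rep2 d r (foldAll K1 s)) := by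
    intro s; rw [hsplit]; simp [foldAll]
  rw [hfold, hfold t]
  rw [foldAll_pct_otherkey d hd K1 hK1 t]
  rw [show rep2 d r ('%' :: d :: foldAll K1 t) = r ++ rep2 d r (foldAll K1 t) by simp [rep2]]
  rw [foldAll_append_no_pct r hr]

lemma foldAll_nil : ∀ (ks : List (Char × List Char)), foldAll ks [] = [] := by
  intro ks
  induction ks with
  | nil => rfl
  | cons p ks ih => simpa [foldAll, rep2] using ih

lemma main_scan_aux : ∀ (n : Nat) (l : List Char), l.length ≤ n → foldAll kvs l = scanGo l := by
  intro n
  induction n with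
  | zero =>
    intro l hl
    have : l = [] := List.eq_nil_of_length_eq_zero (Nat.le_zero.mp hl)
    subst this
    rw [foldAll_nil, scanGo]
  | succ n ih =>
    intro l hl
    cases l with
    | nil => rw [foldAll_nil, scanGo]
    | cons c t =>
      by_cases hc : c = '%'
      · subst hc
        cases t with
        | nil => rw [foldAll_pct_nil, scanGo]; simp
        | cons d t' =>
          rw [scanGo]
          cases hfind : kvs.find? (fun p => p.1 == d) with
          | none =>
            have hnk : ∀ p ∈ kvs, p.1 ≠ d := by
              intro p hp
              have := List.find?_eq_none.mp hfind p hp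
              simpa using this
            have hsafe : headSafe (d :: t') := by
              intro e he q hq
              simp only [List.head?_cons, Option.some.injEq] at he
              exact he ▸ hnk q hq
            rw [bridge_none d hnk]
            rw [foldAll_pct_safe kvs (fun p hp => hp) _ hsafe,
                ih (d :: t') (by simp at hl ⊢; omega)]
            simp
          | some p =>
            obtain ⟨x, r⟩ := p
            obtain ⟨hbeq, K1, K2, hsplit, hK1⟩ := List.find?_eq_some_iff_append.mp hfind
            have hx : x = d := by simpa using hbeq
            subst hx
            have hmem : (x, r) ∈ kvs := by
              rw [hsplit]; exact List.mem_append_right _ List.mem_cons_self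
            have hK1' : ∀ q ∈ K1, q.1 ≠ x := by
              intro q hq
              simpa using hK1 q hq
            rw [bridge_mem (x, r) hmem]
            rw [foldAll_keyhit x r K1 K2 hsplit hK1' t', ih t' (by simp at hl ⊢; omega)]
            simp
      · rw [foldAll_cons_ne c hc kvs t, scanGo.eq_def]
        simp only [if_neg hc]
        rw [ih t (by simp at hl ⊢; omega)]

lemma main_scan (l : List Char) : foldAll kvs l = scanGo l :=
  main_scan_aux l.length l le_rfl

lemma fold_str (ks : List (Char × List Char)) (s : String) :
    ((ks.map (fun p => (String.ofList ['%', p.1], String.ofList p.2))).foldl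
        (fun a p => PySem.Str.replace a p.1 p.2) s).toList = foldAll ks s.toList := by
  induction ks generalizing s with
  | nil => rfl
  | cons p ks ih =>
    simp only [List.map_cons, List.foldl_cons, foldAll] at *
    rw [ih]
    have : (PySem.Str.replace s (String.ofList ['%', p.1]) (String.ofList p.2)).toList =
        rep2 p.1 p.2 s.toList := by
      rw [PySem.Str.toList_replace]
      simp only [String.toList_ofList]
      exact replace_eq_rep2 p.1 p.2 s.toList
    rw [this]

theorem a_bridge (fs : String) :
    regex_datetime_py fs = String.ofList (foldAll kvs fs.toList) := by
  have h1 : regex_datetime_py fs =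
      (kvs.map (fun p => (String.ofList ['%', p.1], String.ofList p.2))).foldl
        (fun a p => PySem.Str.replace a p.1 p.2) fs := rfl
  rw [String.ext_iff, h1, fold_str]
  simp [String.toList_ofList]

-- ===== VERDICT (by name: the statement is the Claim_ definition above) =====
theorem regex_datetime_py_spec : Claim_equal_regex_datetime_py := by
  intro fs _
  unfold Spec_regex_datetime_py regex_datetime_py_alt
  rw [a_bridge, main_scan]
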